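-- pv_equiv track=rewrite | github.com/KrishnaPodu/NYAYAI | frontend/app.py | highlight_mistakes
-- ===== SOURCE A (Python) =====
-- def highlight_mistakes(text):
--     """
--     Dummy proofreading example:
--     Highlights common spelling mistakes.
--     """
--     mistakes = {
--         "teh": "the",
--         "recieve": "receive",
--         "adress": "address",
--     }
--
--     processed = text
--
--     for wrong, correct in mistakes.items():
--         processed = processed.replace(
--             wrong,
--             f"<span style='background-color:yellow; font-weight:bold;'>{wrong}</span>"
--         )
--
--     return processed
-- ===== SOURCE B (Python) =====
-- def highlight_mistakes(text):
--     """
--     Dummy proofreading example: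
--     Highlights common spelling mistakes.
--
--     One left-to-right scan: at each position try the three misspelled keys
--     in order; on a match emit the wrapped span and jump past the key,
--     otherwise copy one character.
--     """
--     keys = ("teh", "recieve", "adress")
--     out = []
--     i = 0
--     n = len(text)
--     while i < n:
--         for k in keys:
--             if text.startswith(k, i):
--                 out.append(
--                     "<span style='background-color:yellow; font-weight:bold;'>"
--                     + k + "</span>"
--                 )
--                 i += len(k)
--                 break
--         else:
--             out.append(text[i])
--             i += 1
--     return "".join(out)
-- ===== Notes on version B (the rewrite author's own statement) =====
-- stated objective: alternative
-- what changed: Replaced three sequential full-text str.replace passes (one per misspelled key) by a single left-to-right scan that tries the three keys at each position, emits the span for the first match and jumps past it, accumulating output pieces joined once at the end.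
import Mathlib
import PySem

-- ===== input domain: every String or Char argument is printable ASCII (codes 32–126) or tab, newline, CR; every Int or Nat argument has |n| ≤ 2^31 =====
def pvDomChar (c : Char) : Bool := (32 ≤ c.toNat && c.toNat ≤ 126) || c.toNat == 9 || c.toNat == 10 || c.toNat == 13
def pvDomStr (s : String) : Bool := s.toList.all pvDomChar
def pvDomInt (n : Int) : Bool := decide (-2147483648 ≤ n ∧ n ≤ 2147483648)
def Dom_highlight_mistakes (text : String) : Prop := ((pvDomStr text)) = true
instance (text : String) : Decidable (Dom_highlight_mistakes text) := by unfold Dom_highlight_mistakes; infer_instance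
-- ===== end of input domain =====

-- B replaces A's three sequential full-text replace passes by one left-to-right scan
-- trying the three keys at each position (alternative decomposition, same cost).

set_option maxRecDepth 10000
set_option maxHeartbeats 1000000


-- ===== PORT A =====
-- the dict literal, then the for-loop of str.replace calls over its items
def highlight_mistakes (text : String) : String :=
  let mistakes : PySem.Dict String String :=
    PySem.Dict.ofList [("teh", "the"), ("recieve", "receive"), ("adress", "address")]
  mistakes.items.foldl
    (fun processed wc =>
      PySem.Str.replace processed wc.1
        ("<span style='background-color:yellow; font-weight:bold;'>" ++ wc.1 ++ "</span>"))
    text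

-- ===== PORT B =====
-- the span markup around a matched key ("… " + k + "</span>" in Source B)
def pvWrap (k : List Char) : List Char :=
  "<span style='background-color:yellow; font-weight:bold;'>".toList ++ k ++ "</span>".toList

-- Source B's while loop: at each position try the three keys in order (text.startswith(k, i));
-- on a match emit the wrapped key and jump len(k) forward, else copy one character.
def highlight_mistakes_go : List Char → List Char
  | [] => []
  | c :: t =>
    if ("teh".toList).isPrefixOf (c :: t) then
      pvWrap "teh".toList ++ highlight_mistakes_go ((c :: t).drop 3)
    else if ("recieve".toList).isPrefixOf (c :: t) then
      pvWrap "recieve".toList ++ highlight_mistakes_go ((c :: t).drop 7)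
    else if ("adress".toList).isPrefixOf (c :: t) then
      pvWrap "adress".toList ++ highlight_mistakes_go ((c :: t).drop 6)
    else c :: highlight_mistakes_go t
termination_by l => l.length
decreasing_by all_goals simp [List.length_drop]

def highlight_mistakes_alt (text : String) : String :=
  String.ofList (highlight_mistakes_go text.toList)

-- ===== PRECONDITION & SPEC =====
def Spec_highlight_mistakes (text : String) (out : String) : Prop := out = highlight_mistakes_alt text
instance (text : String) (out : String) : Decidable (Spec_highlight_mistakes text out) := by unfold Spec_highlight_mistakes; infer_instance

-- ===== CLAIM (what is proved, stated in full; the proofs are below) =====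
def Claim_equal_highlight_mistakes : Prop := ∀ (text : String), Dom_highlight_mistakes text → Spec_highlight_mistakes text (highlight_mistakes text)

-- ===== LEMMAS AND PROOFS =====

-- replace.go with enough fuel: fuel is irrelevant and the accumulator factors out
theorem pv_go_spec (old new : List Char) (hold : old ≠ []) :
    ∀ fuel l acc, List.length l ≤ fuel →
      PySem.Chars.replace.go old new fuel l acc
        = acc.reverse ++ PySem.Chars.replace.go old new l.length l [] := by
  intro fuel
  induction fuel using Nat.strong_induction_on with
  | _ fuel ih =>
    intro l acc hle
    have hone : old ≠ [] → 1 ≤ old.length := by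
      intro h; cases old with
      | nil => exact absurd rfl h
      | cons a b => simp
    match fuel, l with
    | 0, l =>
      have : l = [] := List.length_eq_zero_iff.mp (Nat.le_zero.mp hle)
      subst this
      simp [PySem.Chars.replace.go]
    | fuel+1, [] => simp [PySem.Chars.replace.go]
    | fuel+1, c :: t =>
      rw [PySem.Chars.replace.go.eq_def]
      by_cases hpre : old.isPrefixOf (c :: t) = true
      · simp only [if_pos hpre]
        have hlen : (List.drop old.length (c :: t)).length ≤ fuel := by
          simp only [List.length_drop, List.length_cons] at *
          have := hone hold; omega
        rw [ih fuel (by omega) _ _ hlen]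
        conv_rhs => rw [List.length_cons, PySem.Chars.replace.go.eq_def]
        simp only [if_pos hpre]
        have hlen2 : (List.drop old.length (c :: t)).length ≤ t.length := by
          simp only [List.length_drop, List.length_cons]
          have := hone hold; omega
        rw [ih t.length (by simp only [List.length_cons] at hle; omega) _ _ hlen2]
        simp
      · simp only [if_neg hpre]
        have hlen : t.length ≤ fuel := by simp only [List.length_cons] at hle; omega
        rw [ih fuel (by omega) _ _ hlen]
        conv_rhs => rw [List.length_cons, PySem.Chars.replace.go.eq_def]
        simp only [if_neg hpre]
        rw [ih t.length (by simp only [List.length_cons] at hle; omega) t [c] (le_refl _)]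
        simp

theorem pv_replace_nil (old new : List Char) (hold : old ≠ []) :
    PySem.Chars.replace [] old new = [] := by
  simp [PySem.Chars.replace, List.isEmpty_eq_false_iff.mpr hold, PySem.Chars.replace.go]

theorem pv_replace_pos (old new s : List Char) (hold : old ≠ []) (h : old <+: s) :
    PySem.Chars.replace s old new = new ++ PySem.Chars.replace (s.drop old.length) old new := by
  have hone : 1 ≤ old.length := by
    cases old with
    | nil => exact absurd rfl hold
    | cons a b => simp
  match s with
  | [] =>
    exact absurd (List.eq_nil_of_prefix_nil h) hold
  | c :: t =>
    have hrepl : ∀ s' : List Char, PySem.Chars.replace s' old new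
        = PySem.Chars.replace.go old new s'.length s' [] := by
      intro s'
      have hh : old.isEmpty = false := by
        cases old with | nil => exact absurd rfl hold | cons a b => rfl
      simp [PySem.Chars.replace, hh]
    rw [hrepl, List.length_cons, PySem.Chars.replace.go.eq_def]
    simp only [if_pos (List.isPrefixOf_iff_prefix.mpr h)]
    have hlen : (List.drop old.length (c :: t)).length ≤ t.length := by
      simp only [List.length_drop, List.length_cons]; omega
    rw [pv_go_spec old new hold _ _ _ hlen, hrepl]
    simp

theorem pv_replace_cons_neg (old new : List Char) (c : Char) (t : List Char) (hold : old ≠ [])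
    (h : ¬ old <+: (c :: t)) :
    PySem.Chars.replace (c :: t) old new = c :: PySem.Chars.replace t old new := by
  have hrepl : ∀ s' : List Char, PySem.Chars.replace s' old new
      = PySem.Chars.replace.go old new s'.length s' [] := by
    intro s'
    have hh : old.isEmpty = false := by
      cases old with | nil => exact absurd rfl hold | cons a b => rfl
    simp [PySem.Chars.replace, hh]
  rw [hrepl, List.length_cons, PySem.Chars.replace.go.eq_def]
  simp only [if_neg (show ¬(old.isPrefixOf (c :: t) = true) by
    simp only [List.isPrefixOf_iff_prefix]; exact h)]
  rw [pv_go_spec old new hold _ _ _ (le_refl _), hrepl]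
  simp

-- a pattern that neither occurs inside `a` nor continues a suffix of `a`
-- cannot match starting strictly inside `a ++ b`
theorem pv_no_cross (pat a b : List Char)
    (hb : (List.range a.length).all
        (fun j => !(pat.isPrefixOf (a.drop j)) && !((a.drop j).isPrefixOf pat)) = true) :
    ∀ i, i < a.length → ¬ pat <+: (a ++ b).drop i := by
  have h : ∀ j, j < a.length → ¬ pat <+: a.drop j ∧ ¬ a.drop j <+: pat := by
    intro j hj
    have hj2 := List.all_eq_true.mp hb j (List.mem_range.mpr hj)
    simp only [Bool.and_eq_true, Bool.not_eq_true'] at hj2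
    exact ⟨fun hc => by simp [List.isPrefixOf_iff_prefix.mpr hc] at hj2,
           fun hc => by simp [List.isPrefixOf_iff_prefix.mpr hc] at hj2⟩
  intro i hi hp
  rw [List.drop_append_of_le_length (le_of_lt hi)] at hp
  rcases Nat.lt_or_ge (a.drop i).length pat.length with hlt | hle
  · exact (h i hi).2
      (List.prefix_of_prefix_length_le (List.prefix_append _ _) hp (le_of_lt hlt))
  · exact (h i hi).1
      (List.prefix_of_prefix_length_le hp (List.prefix_append _ _) hle)

-- replace steps over a block in which the pattern never starts
theorem pv_replace_append (old new a b : List Char) (hold : old ≠ [])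
    (h : ∀ i, i < a.length → ¬ old <+: (a ++ b).drop i) :
    PySem.Chars.replace (a ++ b) old new = a ++ PySem.Chars.replace b old new := by
  induction a with
  | nil => simp
  | cons c a' ih =>
    have h0 : ¬ old <+: ((c :: a') ++ b) := by
      have := h 0 (by simp)
      simpa using this
    rw [List.cons_append, pv_replace_cons_neg old new c (a' ++ b) hold h0]
    rw [ih (fun i hi => by
      have := h (i + 1) (by simp only [List.length_cons]; omega)
      simpa using this)]
    simp

-- a pattern whose characters all differ from the head of `new` is a prefix of
-- `replace t old new` only if it is a prefix of `t`
theorem pv_prefix_transfer (old : List Char) (d : Char) (nw : List Char) (hold : old ≠ []) :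
    ∀ t p, p.all (fun c => !(c == d)) = true → p <+: PySem.Chars.replace t old (d :: nw) → p <+: t := by
  suffices H : ∀ n (t : List Char), t.length ≤ n → ∀ p, p.all (fun c => !(c == d)) = true →
      p <+: PySem.Chars.replace t old (d :: nw) → p <+: t by
    exact fun t p hc hp => H t.length t (le_refl _) p hc hp
  intro n
  induction n with
  | zero =>
    intro t ht p hc hp
    have : t = [] := List.length_eq_zero_iff.mp (Nat.le_zero.mp ht)
    subst this
    rwa [pv_replace_nil old _ hold] at hp
  | succ n ih =>
    intro t ht p hc hp
    match t with
    | [] => rwa [pv_replace_nil old _ hold] at hp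
    | c :: t' =>
      have hone : 1 ≤ old.length := by
        cases old with
        | nil => exact absurd rfl hold
        | cons a b => simp
      by_cases hpre : old <+: (c :: t')
      · rw [pv_replace_pos old _ _ hold hpre] at hp
        match p with
        | [] => exact List.nil_prefix
        | q :: p' =>
          have hqd : q = d := (List.cons_prefix_cons.mp hp).1
          have := List.all_eq_true.mp hc q (by simp)
          simp [hqd] at this
      · rw [pv_replace_cons_neg old _ c t' hold hpre] at hp
        match p with
        | [] => exact List.nil_prefix
        | q :: p' =>
          obtain ⟨hq, hp'⟩ := List.cons_prefix_cons.mp hp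
          have := ih t' (by simp only [List.length_cons] at ht; omega) p'
            (List.all_eq_true.mpr (fun c hcm => List.all_eq_true.mp hc c (by simp [hcm]))) hp'
          exact List.cons_prefix_cons.mpr ⟨hq, this⟩

-- the three sequential replaces of A equal B's single scan
theorem pv_main : ∀ l : List Char,
    PySem.Chars.replace
      (PySem.Chars.replace
        (PySem.Chars.replace l "teh".toList (pvWrap "teh".toList))
        "recieve".toList (pvWrap "recieve".toList))
      "adress".toList (pvWrap "adress".toList)
    = highlight_mistakes_go l := by
  suffices H : ∀ n (l : List Char), l.length ≤ n →
      PySem.Chars.replace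
        (PySem.Chars.replace
          (PySem.Chars.replace l "teh".toList (pvWrap "teh".toList))
          "recieve".toList (pvWrap "recieve".toList))
        "adress".toList (pvWrap "adress".toList)
      = highlight_mistakes_go l by
    exact fun l => H l.length l (le_refl _)
  have hT : ("teh".toList : List Char) ≠ [] := by decide
  have hR : ("recieve".toList : List Char) ≠ [] := by decide
  have hA : ("adress".toList : List Char) ≠ [] := by decide
  intro n
  induction n with
  | zero =>
    intro l hl
    have : l = [] := List.length_eq_zero_iff.mp (Nat.le_zero.mp hl)
    subst this
    rw [pv_replace_nil _ _ hT, pv_replace_nil _ _ hR, pv_replace_nil _ _ hA,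
        highlight_mistakes_go]
  | succ n ih =>
    intro l hl
    match l with
    | [] =>
      rw [pv_replace_nil _ _ hT, pv_replace_nil _ _ hR, pv_replace_nil _ _ hA,
          highlight_mistakes_go]
    | c :: t =>
      by_cases h1 : ("teh".toList : List Char) <+: (c :: t)
      · -- l starts with "teh"
        have hsplit : (c :: t) = "teh".toList ++ (c :: t).drop 3 := by
          rcases h1 with ⟨r, hr⟩
          rw [← hr]; rfl
        have hd3 : ((c :: t).drop 3).length ≤ n := by
          simp only [List.length_drop, List.length_cons] at *
          omega
        rw [pv_replace_pos _ _ _ hT h1]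
        have hlenT : ("teh".toList : List Char).length = 3 := by decide
        rw [hlenT]
        rw [pv_replace_append "recieve".toList _ (pvWrap "teh".toList) _ hR
          (pv_no_cross _ _ _ (by decide))]
        rw [pv_replace_append "adress".toList _ (pvWrap "teh".toList) _ hA
          (pv_no_cross _ _ _ (by decide))]
        rw [ih _ hd3]
        rw [highlight_mistakes_go, if_pos (List.isPrefixOf_iff_prefix.mpr h1)]
      · by_cases h2 : ("recieve".toList : List Char) <+: (c :: t)
        · -- l starts with "recieve"
          have hsplit : (c :: t) = "recieve".toList ++ (c :: t).drop 7 := by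
            rcases h2 with ⟨r, hr⟩
            rw [← hr]; rfl
          have hd7 : ((c :: t).drop 7).length ≤ n := by
            simp only [List.length_drop, List.length_cons] at *
            omega
          conv_lhs => rw [hsplit]
          rw [pv_replace_append "teh".toList _ "recieve".toList _ hT
            (pv_no_cross _ _ _ (by decide))]
          rw [pv_replace_pos _ _ _ hR (List.prefix_append _ _)]
          have hlenR : ("recieve".toList : List Char).length = 7 := by decide
          rw [hlenR, List.drop_left' (by decide)]
          rw [pv_replace_append "adress".toList _ (pvWrap "recieve".toList) _ hA
            (pv_no_cross _ _ _ (by decide))]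
          rw [ih _ hd7]
          rw [highlight_mistakes_go, if_neg (by rw [List.isPrefixOf_iff_prefix]; exact h1),
              if_pos (List.isPrefixOf_iff_prefix.mpr h2)]
        · by_cases h3 : ("adress".toList : List Char) <+: (c :: t)
          · -- l starts with "adress"
            have hsplit : (c :: t) = "adress".toList ++ (c :: t).drop 6 := by
              rcases h3 with ⟨r, hr⟩
              rw [← hr]; rfl
            have hd6 : ((c :: t).drop 6).length ≤ n := by
              simp only [List.length_drop, List.length_cons] at *
              omega
            conv_lhs => rw [hsplit]
            rw [pv_replace_append "teh".toList _ "adress".toList _ hT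
              (pv_no_cross _ _ _ (by decide))]
            rw [pv_replace_append "recieve".toList _ "adress".toList _ hR
              (pv_no_cross _ _ _ (by decide))]
            rw [pv_replace_pos _ _ _ hA (List.prefix_append _ _)]
            have hlenA : ("adress".toList : List Char).length = 6 := by decide
            rw [hlenA, List.drop_left' (by decide)]
            rw [ih _ hd6]
            rw [highlight_mistakes_go, if_neg (by rw [List.isPrefixOf_iff_prefix]; exact h1),
                if_neg (by rw [List.isPrefixOf_iff_prefix]; exact h2),
                if_pos (List.isPrefixOf_iff_prefix.mpr h3)]
          · -- no key matches at this position
            have hW1 : pvWrap "teh".toList = '<' :: (pvWrap "teh".toList).tail := by decide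
            have hW2 : pvWrap "recieve".toList = '<' :: (pvWrap "recieve".toList).tail := by decide
            have e1 : PySem.Chars.replace (c :: t) "teh".toList (pvWrap "teh".toList)
                = c :: PySem.Chars.replace t "teh".toList (pvWrap "teh".toList) :=
              pv_replace_cons_neg _ _ _ _ hT h1
            have hrec : ¬ ("recieve".toList : List Char) <+:
                PySem.Chars.replace (c :: t) "teh".toList (pvWrap "teh".toList) := by
              intro hcon
              rw [hW1] at hcon
              exact h2 (pv_prefix_transfer _ _ _ hT _ _ (by decide) hcon)
            have e2 : PySem.Chars.replace
                  (PySem.Chars.replace (c :: t) "teh".toList (pvWrap "teh".toList))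
                  "recieve".toList (pvWrap "recieve".toList)
                = c :: PySem.Chars.replace
                  (PySem.Chars.replace t "teh".toList (pvWrap "teh".toList))
                  "recieve".toList (pvWrap "recieve".toList) := by
              rw [e1] at hrec ⊢
              exact pv_replace_cons_neg _ _ _ _ hR hrec
            have hadr : ¬ ("adress".toList : List Char) <+:
                PySem.Chars.replace
                  (PySem.Chars.replace (c :: t) "teh".toList (pvWrap "teh".toList))
                  "recieve".toList (pvWrap "recieve".toList) := by
              intro hcon
              rw [hW2] at hcon
              have := pv_prefix_transfer _ _ _ hR _ _ (by decide) hcon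
              rw [hW1] at this
              exact h3 (pv_prefix_transfer _ _ _ hT _ _ (by decide) this)
            rw [e2] at hadr
            rw [e2, pv_replace_cons_neg _ _ _ _ hA hadr]
            rw [ih t (by simp only [List.length_cons] at hl; omega)]
            rw [highlight_mistakes_go, if_neg (by rw [List.isPrefixOf_iff_prefix]; exact h1),
                if_neg (by rw [List.isPrefixOf_iff_prefix]; exact h2),
                if_neg (by rw [List.isPrefixOf_iff_prefix]; exact h3)]

-- ===== VERDICT (by name: the statement is the Claim_ definition above) =====
theorem highlight_mistakes_spec : Claim_equal_highlight_mistakes := by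
  intro text _
  show highlight_mistakes text = highlight_mistakes_alt text
  simp only [highlight_mistakes, highlight_mistakes_alt]
  have hitems : (PySem.Dict.ofList
      [("teh", "the"), ("recieve", "receive"), ("adress", "address")]
      : PySem.Dict String String).items
      = [("teh", "the"), ("recieve", "receive"), ("adress", "address")] := by decide
  rw [hitems]
  simp only [List.foldl_cons, List.foldl_nil, PySem.Str.replace, String.toList_ofList,
    String.toList_append]
  exact congrArg String.ofList (pv_main text.toList)
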